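-- pv_equiv track=rewrite | github.com/rishisankhla/unit_test_python_statistics_functions | part2_midterm_code_unit_testing/part2_midterm_code_unit_testing/snakestats.py | medianhigh2
-- ===== SOURCE A (Python) =====
-- def medianhigh2(testlist):
--     i=0
--     while len(testlist)!=2:
--         if i==0:
--             i=1
--             del testlist[0]
--         else:
--             i=0
--             del testlist[-1]
--     result=testlist[1]
--     return result
-- ===== SOURCE B (Python) =====
-- def medianhigh2(testlist):
--     # Closed form: alternating front/back deletions leave the slice
--     # testlist[f : f+2] with f = ceil((n-2)/2); return its second element.
--     return testlist[(len(testlist) - 1) // 2 + 1]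
-- ===== Notes on version B (the rewrite author's own statement) =====
-- stated objective: faster
-- what changed: Replaces the O(n^2) alternating end-deletion loop by directly indexing the original list at the closed-form final position (n-1)//2 + 1.
import Mathlib
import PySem

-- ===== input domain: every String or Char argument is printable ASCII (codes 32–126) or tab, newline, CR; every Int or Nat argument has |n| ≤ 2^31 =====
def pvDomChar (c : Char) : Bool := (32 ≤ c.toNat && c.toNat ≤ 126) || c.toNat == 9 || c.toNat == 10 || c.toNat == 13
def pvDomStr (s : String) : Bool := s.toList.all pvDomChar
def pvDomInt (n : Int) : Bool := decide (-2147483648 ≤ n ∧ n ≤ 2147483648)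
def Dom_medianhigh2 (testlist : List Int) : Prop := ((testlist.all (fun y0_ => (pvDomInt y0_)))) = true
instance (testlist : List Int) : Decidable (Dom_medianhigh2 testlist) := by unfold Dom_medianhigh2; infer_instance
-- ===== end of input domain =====

-- B replaces A's quadratic alternating end-deletion loop by one closed-form index into the
-- original list ('faster'); A mutates its argument in place, B does not — the equivalence
-- proved here is about the RETURN value only.

-- ===== PORT A =====
-- A's while loop: alternate 'del testlist[0]' / 'del testlist[-1]' until len == 2.
-- 'none' models the IndexError raised by 'del' on an empty list (len < 2 initially).
def medianhigh2_loop (i : Nat) (l : List Int) : Option (List Int) :=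
  if l.length = 2 then some l
  else
    match l with
    | [] => none
    | x :: xs =>
      if i = 0 then medianhigh2_loop 1 xs
      else medianhigh2_loop 0 ((x :: xs).dropLast)
termination_by l.length
decreasing_by
  · simp
  · simp [List.length_dropLast]

def medianhigh2 (testlist : List Int) : Int :=
  match medianhigh2_loop 0 testlist with
  | some r => (PySem.List.pyGet? r 1).getD 0   -- result = testlist[1]; Pre_ rules out the none case
  | none => 0

-- ===== PORT B =====
def medianhigh2_alt (testlist : List Int) : Int :=
  (PySem.List.pyGet? testlist
      (PySem.Int.floordiv ((testlist.length : Int) - 1) 2 + 1)).getD 0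

-- ===== PRECONDITION & SPEC =====
-- A raises IndexError (inside its loop) when len(testlist) < 2; exactly those inputs are excluded.
def Pre_medianhigh2 (testlist : List Int) : Prop := 2 ≤ testlist.length
instance (testlist : List Int) : Decidable (Pre_medianhigh2 testlist) := by unfold Pre_medianhigh2; infer_instance
def pvWitness_medianhigh2 : List Int := [3, 1, 4, 1, 5]
def Spec_medianhigh2 (testlist : List Int) (out : Int) : Prop := out = medianhigh2_alt testlist
instance (testlist : List Int) (out : Int) : Decidable (Spec_medianhigh2 testlist out) := by unfold Spec_medianhigh2; infer_instance

-- ===== CLAIM (what is proved, stated in full; the proofs are below) =====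
def Claim_equal_medianhigh2 : Prop := ∀ (testlist : List Int), Dom_medianhigh2 testlist → Pre_medianhigh2 testlist → Spec_medianhigh2 testlist (medianhigh2 testlist)

-- ===== LEMMAS AND PROOFS =====

-- The loop, started with i = 0 on a list of length n ≥ 2, returns the 2-element slice
-- starting at the closed-form index (n-1)/2.
lemma medianhigh2_loop_eq (n : Nat) : ∀ l : List Int, l.length = n → 2 ≤ n →
    medianhigh2_loop 0 l = some ((l.drop ((n - 1) / 2)).take 2) := by
  induction n using Nat.strong_induction_on with
  | _ n ih =>
    intro l hl h2
    by_cases hn2 : n = 2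
    · subst hn2
      rw [medianhigh2_loop.eq_def]
      simp [hl, List.take_of_length_le]
    · cases l with
      | nil => simp at hl; omega
      | cons x xs =>
        have hxs : xs.length = n - 1 := by simpa using congrArg (· - 1) hl
        rw [medianhigh2_loop.eq_def]
        simp only [hl, hn2, reduceIte]
        by_cases hn3 : n = 3
        · subst hn3
          rw [medianhigh2_loop.eq_def]
          simp [hxs, List.take_of_length_le]
        · have hn4 : 4 ≤ n := by omega
          rw [medianhigh2_loop.eq_def]
          have hxsne : xs.length ≠ 2 := by omega
          simp only [hxsne, reduceIte]
          cases xs with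
          | nil => simp at hxs; omega
          | cons y ys =>
            have hys : ys.length = n - 2 := by
              have h := hxs; simp at h; omega
            have hdl : ((y :: ys).dropLast).length = n - 2 := by
              rw [List.length_dropLast]; simp; omega
            show medianhigh2_loop 0 ((y :: ys).dropLast) = _
            rw [ih (n - 2) (by omega) _ hdl (by omega)]
            congr 1
            -- (dropLast.drop k).take 2 = (xs.drop k).take 2, and shift past the head x
            have hk : (n - 1) / 2 = (n - 3) / 2 + 1 := by omega
            rw [hk]
            simp only [List.drop_succ_cons]
            rw [List.dropLast_eq_take, List.drop_take, List.take_take]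
            congr 1
            have hlen : (y :: ys).length = n - 1 := hxs
            omega

lemma pyGet_slice (l : List Int) (f : Nat) (hf : f + 1 < l.length) :
    PySem.List.pyGet? ((l.drop f).take 2) 1 = some l[f + 1] := by
  have h1 : 1 < ((l.drop f).take 2).length := by
    simp [List.length_take, List.length_drop]; omega
  rw [show (1 : Int) = ((1 : Nat) : Int) by norm_num, PySem.List.pyGet?_natCast]
  rw [List.getElem?_take, List.getElem?_drop]
  simp [List.getElem?_eq_getElem (by omega : f + 1 < l.length)]

-- ===== VERDICT (by name: the statement is the Claim_ definition above) =====
theorem medianhigh2_spec : Claim_equal_medianhigh2 := by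
  intro l _ hpre
  unfold Spec_medianhigh2 medianhigh2 medianhigh2_alt
  have h2 : 2 ≤ l.length := hpre
  rw [medianhigh2_loop_eq l.length l rfl h2]
  have hcast : ((l.length : Int) - 1) = ((l.length - 1 : Nat) : Int) := by
    omega
  have hfd : PySem.Int.floordiv ((l.length : Int) - 1) 2 = (((l.length - 1) / 2 : Nat) : Int) := by
    rw [hcast]; exact_mod_cast PySem.Int.floordiv_natCast (l.length - 1) 2
  rw [hfd]
  show (PySem.List.pyGet? ((l.drop ((l.length - 1) / 2)).take 2) 1).getD 0 = _
  have hf : (l.length - 1) / 2 + 1 < l.length := by omega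
  rw [pyGet_slice l _ hf]
  rw [show (((l.length - 1) / 2 : Nat) : Int) + 1 = (((l.length - 1) / 2 + 1 : Nat) : Int) by push_cast; ring,
    PySem.List.pyGet?_natCast]
  simp [List.getElem?_eq_getElem hf]
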